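-- pv_equiv track=rewrite | github.com/junix/ner | utils/str_algo.py | remove_segment
-- ===== SOURCE A (Python) =====
-- def remove_segment(s, beg, end):
--     prev_beg_count = 0
--     acc = []
--     while s:
--         ch = s[0]
--         s = s[1:]
--         if ch == beg:
--             prev_beg_count += 1
--         elif ch == end:
--             if prev_beg_count > 0:
--                 prev_beg_count -= 1
--             else:
--                 acc = []
--         else:
--             if prev_beg_count == 0:
--                 acc.append(ch)
--     return ''.join(acc)
-- ===== SOURCE B (Python) =====
-- def remove_segment(s, beg, end):
--     depth = 0
--     out = []
--     for ch in s:
--         if ch == beg: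
--             depth += 1
--         elif ch == end:
--             if depth > 0:
--                 depth -= 1
--             else:
--                 out.clear()
--         elif depth == 0:
--             out.append(ch)
--     return ''.join(out)
-- ===== Notes on version B (the rewrite author's own statement) =====
-- stated objective: faster
-- what changed: B makes a single for-loop pass over the characters with a (depth,out) state instead of A's while loop that re-slices the remaining string (s = s[1:]) at every step.
import Mathlib
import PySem

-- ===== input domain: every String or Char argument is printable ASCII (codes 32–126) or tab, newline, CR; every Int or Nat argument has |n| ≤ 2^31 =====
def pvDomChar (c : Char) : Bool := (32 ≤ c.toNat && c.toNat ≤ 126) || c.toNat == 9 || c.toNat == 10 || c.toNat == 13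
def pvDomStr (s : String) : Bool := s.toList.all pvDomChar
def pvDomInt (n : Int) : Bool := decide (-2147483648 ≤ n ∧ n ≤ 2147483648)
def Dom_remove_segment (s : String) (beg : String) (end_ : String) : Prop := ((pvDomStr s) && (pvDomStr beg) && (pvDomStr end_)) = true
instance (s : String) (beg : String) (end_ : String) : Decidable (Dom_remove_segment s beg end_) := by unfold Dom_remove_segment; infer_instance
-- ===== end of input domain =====

-- B replaces A's while loop with repeated string slicing (s = s[1:]) by a single
-- foldl pass over the characters carrying a (depth, out) state: same result, O(n) not O(n^2).

-- ===== PORT A =====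
-- A's while loop: pop s[0], step the (prev_beg_count, acc) state, recurse on s[1:].
def removeSegGoA (beg : String) (end_ : String) : List Char → Int → List Char → List Char
  | [], _, acc => acc
  | ch :: rest, cnt, acc =>
    if String.singleton ch = beg then removeSegGoA beg end_ rest (cnt + 1) acc
    else if String.singleton ch = end_ then
      if cnt > 0 then removeSegGoA beg end_ rest (cnt - 1) acc
      else removeSegGoA beg end_ rest cnt []
    else
      if cnt = 0 then removeSegGoA beg end_ rest cnt (acc ++ [ch])
      else removeSegGoA beg end_ rest cnt acc

def remove_segment (s : String) (beg : String) (end_ : String) : String :=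
  String.mk (removeSegGoA beg end_ s.toList 0 [])

-- ===== PORT B =====
-- B's single for-loop: fold the (depth, out) state over the characters.
def removeSegStepB (beg : String) (end_ : String) (st : Int × List Char) (ch : Char) : Int × List Char :=
  if String.singleton ch = beg then (st.1 + 1, st.2)
  else if String.singleton ch = end_ then
    if st.1 > 0 then (st.1 - 1, st.2) else (st.1, [])
  else
    if st.1 = 0 then (st.1, st.2 ++ [ch]) else st

def remove_segment_alt (s : String) (beg : String) (end_ : String) : String :=
  String.mk (s.toList.foldl (removeSegStepB beg end_) (0, [])).2

-- ===== PRECONDITION & SPEC =====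
def Spec_remove_segment (s : String) (beg : String) (end_ : String) (out : String) : Prop := out = remove_segment_alt s beg end_
instance (s : String) (beg : String) (end_ : String) (out : String) : Decidable (Spec_remove_segment s beg end_ out) := by unfold Spec_remove_segment; infer_instance

-- ===== CLAIM (what is proved, stated in full; the proofs are below) =====
def Claim_equal_remove_segment : Prop := ∀ (s : String) (beg : String) (end_ : String), Dom_remove_segment s beg end_ → Spec_remove_segment s beg end_ (remove_segment s beg end_)

-- ===== LEMMAS AND PROOFS =====
theorem removeSegGoA_eq_foldl (beg end_ : String) :
    ∀ (l : List Char) (cnt : Int) (acc : List Char),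
      removeSegGoA beg end_ l cnt acc = (l.foldl (removeSegStepB beg end_) (cnt, acc)).2 := by
  intro l
  induction l with
  | nil => intro cnt acc; simp [removeSegGoA]
  | cons ch rest ih =>
    intro cnt acc
    simp only [removeSegGoA, List.foldl_cons, removeSegStepB]
    split_ifs <;> simp [ih]

-- ===== VERDICT (by name: the statement is the Claim_ definition above) =====
theorem remove_segment_spec : Claim_equal_remove_segment := by
  intro s beg end_ _
  unfold Spec_remove_segment remove_segment remove_segment_alt
  rw [removeSegGoA_eq_foldl]
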